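-- pv_equiv track=rewrite | github.com/JaiRaga/hackerearth-problems | monkandpoweroftime.py | processes
-- ===== SOURCE A (Python) =====
-- def processes(c, i):
--     t = 0
--     temp = None
--     while True:
--         if len(c) == 0:
--             break
--         if c[0] == i[0]:
--             t += 1
--             c.pop(0)
--             i.pop(0)
--         else:
--             temp = c.pop(0)
--             c.append(temp)
--             t += 1
--     return t
-- ===== SOURCE B (Python) =====
-- def processes(c, i):
--     # Return value only: unlike A, this does not mutate c or i in place.
--     n = len(c)
--     q = list(c)
--     t = 0
--     for x in i[:n]:
--         r = q.index(x)
--         t += r + 1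
--         q = q[r+1:] + q[:r]
--     return t
-- ===== Notes on version B (the rewrite author's own statement) =====
-- stated objective: alternative
-- what changed: B replaces A's one-by-one rotation simulation (pop(0)/append per unit rotation) by a per-target jump: find the target's index, add index+1 to the count, and re-slice the queue once per target.
import Mathlib
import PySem

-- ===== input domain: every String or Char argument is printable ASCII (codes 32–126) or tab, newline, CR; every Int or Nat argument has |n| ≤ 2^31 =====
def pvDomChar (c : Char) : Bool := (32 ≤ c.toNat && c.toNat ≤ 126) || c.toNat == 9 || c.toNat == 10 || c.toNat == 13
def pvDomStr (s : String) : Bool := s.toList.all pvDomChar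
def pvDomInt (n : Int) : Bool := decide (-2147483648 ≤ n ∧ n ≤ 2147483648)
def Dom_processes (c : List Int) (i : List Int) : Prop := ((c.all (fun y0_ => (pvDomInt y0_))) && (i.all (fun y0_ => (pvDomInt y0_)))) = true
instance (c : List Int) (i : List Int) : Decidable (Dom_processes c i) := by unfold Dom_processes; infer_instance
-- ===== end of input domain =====

-- B replaces A's unit-rotation simulation by a per-target index jump with one re-slice per
-- target (alternative decomposition). A mutates its arguments in place; B does not — the
-- equivalence proved here is about the RETURN value only.

-- ===== PORT A =====
-- A's 'while True' loop, transliterated with a fuel counter: under Pre_processes the loop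
-- performs at most c.length*(c.length+1)/2 iterations, so fuel (n+1)*(n+1) never runs out
-- (the fuel only makes the same computation total; it is not an algorithm switch).
-- The branch where c is nonempty but i is empty is where Python raises IndexError (outside Pre_).
def processesLoopA : Nat → List Int → List Int → Int → Int
  | 0, _, _, t => t
  | fuel+1, c, i, t =>
    match c, i with
    | [], _ => t                                  -- len(c) == 0: break
    | _ :: _, [] => t                             -- Python: IndexError on i[0]; outside Pre_
    | c0 :: cr, i0 :: ir =>
      if c0 = i0 then processesLoopA fuel cr ir (t + 1)            -- pop both, t += 1
      else processesLoopA fuel (cr ++ [c0]) (i0 :: ir) (t + 1)     -- rotate, t += 1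

def processes (c : List Int) (i : List Int) : Int :=
  processesLoopA ((c.length + 1) * (c.length + 1)) c i 0

-- ===== PORT B =====
-- for x in i[:n]: r = q.index(x); t += r + 1; q = q[r+1:] + q[:r]
-- The 'none' branch is where Python's q.index(x) raises ValueError (outside Pre_).
def processesLoopB : List Int → List Int → Int → Int
  | [], _, t => t
  | x :: xs, q, t =>
    match PySem.List.index? q x with
    | some r => processesLoopB xs (q.drop (r + 1) ++ q.take r) (t + (r : Int) + 1)
    | none => t                                   -- Python: ValueError; outside Pre_

def processes_alt (c : List Int) (i : List Int) : Int :=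
  processesLoopB (PySem.List.slice i none (some (c.length : Int))) c 0

-- ===== PRECONDITION & SPEC =====
-- Pre_ is exactly the set of inputs on which the Python A returns: the first c.length
-- targets must be a permutation of c (otherwise A raises IndexError when i runs out,
-- or rotates forever when a target is absent from the queue).
def Pre_processes (c : List Int) (i : List Int) : Prop := (i.take c.length).Perm c
instance (c : List Int) (i : List Int) : Decidable (Pre_processes c i) := by
  unfold Pre_processes; infer_instance

def pvWitness_processes : List Int × List Int := ([1, 2, 3], [2, 1, 3])

def Spec_processes (c : List Int) (i : List Int) (out : Int) : Prop := out = processes_alt c i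
instance (c : List Int) (i : List Int) (out : Int) : Decidable (Spec_processes c i out) := by
  unfold Spec_processes; infer_instance

-- ===== CLAIM (what is proved, stated in full; the proofs are below) =====
def Claim_equal_processes : Prop :=
  ∀ (c : List Int) (i : List Int), Dom_processes c i → Pre_processes c i →
    Spec_processes c i (processes c i)

-- ===== LEMMAS AND PROOFS =====

lemma loopA_nil (fuel : Nat) (i : List Int) (t : Int) :
    processesLoopA fuel [] i t = t := by
  cases fuel <;> simp [processesLoopA]

-- One stage of A: with x at index r of c, A rotates r times then matches once,
-- consuming r+1 fuel and leaving the queue c.drop (r+1) ++ c.take r.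
lemma loopA_stage : ∀ (r : Nat) (c : List Int) (x : Int) (ir : List Int) (t : Int) (fuel : Nat),
    PySem.List.index? c x = some r → r + 1 ≤ fuel →
    processesLoopA fuel c (x :: ir) t =
      processesLoopA (fuel - (r + 1)) (c.drop (r + 1) ++ c.take r) ir (t + (r : Int) + 1) := by
  intro r
  induction r with
  | zero =>
    intro c x ir t fuel hidx hfuel
    cases c with
    | nil => simp [PySem.List.index?] at hidx
    | cons c0 cr =>
      obtain ⟨fuel, rfl⟩ : ∃ f, fuel = f + 1 := ⟨fuel - 1, by omega⟩
      by_cases hc0 : c0 = x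
      · subst hc0
        simp [processesLoopA]
      · rw [PySem.List.index?_cons_of_ne cr hc0] at hidx
        cases h : PySem.List.index? cr x <;> rw [h] at hidx <;> simp at hidx
  | succ r ih =>
    intro c x ir t fuel hidx hfuel
    cases c with
    | nil => simp [PySem.List.index?] at hidx
    | cons c0 cr =>
      obtain ⟨fuel, rfl⟩ : ∃ f, fuel = f + 1 := ⟨fuel - 1, by omega⟩
      by_cases hc0 : c0 = x
      · subst hc0; rw [PySem.List.index?_cons_self] at hidx; simp at hidx
      · rw [PySem.List.index?_cons_of_ne cr hc0] at hidx
        have hcr : PySem.List.index? cr x = some r := by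
          cases h : PySem.List.index? cr x <;> rw [h] at hidx <;> simp at hidx
          rw [hidx]
        obtain ⟨hr, hget, -⟩ := PySem.List.getElem_of_index?_eq_some hcr
        have hmem : x ∈ cr := by
          rw [← PySem.List.index?_isSome_iff, hcr]; rfl
        have hstep : processesLoopA (fuel + 1) (c0 :: cr) (x :: ir) t
            = processesLoopA fuel (cr ++ [c0]) (x :: ir) (t + 1) := by
          simp [processesLoopA, hc0]
        rw [hstep]
        have hidx' : PySem.List.index? (cr ++ [c0]) x = some r := by
          rw [PySem.List.index?_append_of_mem _ hmem]; exact hcr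
        rw [ih (cr ++ [c0]) x ir (t + 1) fuel hidx' (by omega)]
        have hq : (cr ++ [c0]).drop (r + 1) ++ (cr ++ [c0]).take r
            = (c0 :: cr).drop (r + 1 + 1) ++ (c0 :: cr).take (r + 1) := by
          rw [List.drop_append_of_le_length (by omega), List.take_append_of_le_length (by omega)]
          simp
        rw [hq]
        congr 1
        · omega
        · push_cast; ring

-- Main loop invariant: while the remaining targets are a permutation of the queue,
-- A's rotation loop computes the same total as B's jump loop.
lemma loopA_eq_loopB : ∀ (ts c rest : List Int) (t : Int) (fuel : Nat),
    ts.Perm c → c.length * c.length + c.length ≤ fuel →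
    processesLoopA fuel c (ts ++ rest) t = processesLoopB ts c t := by
  intro ts
  induction ts with
  | nil =>
    intro c rest t fuel hperm hfuel
    obtain rfl : c = [] := (List.Perm.nil_eq hperm).symm
    simp [loopA_nil, processesLoopB]
  | cons x xs ih =>
    intro c rest t fuel hperm hfuel
    have hmem : x ∈ c := hperm.mem_iff.mp (List.mem_cons_self ..)
    obtain ⟨r, hidx⟩ : ∃ r, PySem.List.index? c x = some r := by
      have := PySem.List.index?_isSome_iff (xs := c) (v := x) |>.mpr hmem
      cases h : PySem.List.index? c x
      · rw [h] at this; exact absurd this (by simp)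
      · exact ⟨_, rfl⟩
    obtain ⟨hr, hget, -⟩ := PySem.List.getElem_of_index?_eq_some hidx
    have hlen1 : 1 ≤ c.length := by omega
    -- one stage on the A side
    have hfuel1 : r + 1 ≤ fuel := by nlinarith
    rw [List.cons_append, loopA_stage r c x (xs ++ rest) t fuel hidx hfuel1]
    -- unfold one step on the B side
    have hB : processesLoopB (x :: xs) c t
        = processesLoopB xs (c.drop (r + 1) ++ c.take r) (t + (r : Int) + 1) := by
      simp only [processesLoopB, hidx]
    rw [hB]
    -- permutation for the next stage
    have hcd : x :: c.drop (r + 1) = c.drop r := by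
      rw [← hget]; exact List.getElem_cons_drop ..
    have hsplit : c.take r ++ x :: c.drop (r + 1) = c := by
      rw [hcd, List.take_append_drop]
    have hperm' : xs.Perm (c.drop (r + 1) ++ c.take r) := by
      have h1 : (x :: xs).Perm (c.take r ++ x :: c.drop (r + 1)) := by
        rw [hsplit]; exact hperm
      have h2 : (x :: xs).Perm (x :: (c.take r ++ c.drop (r + 1))) :=
        h1.trans List.perm_middle
      exact (h2.cons_inv).trans List.perm_append_comm
    have hlen' : (c.drop (r + 1) ++ c.take r).length = c.length - 1 := by
      simp; omega
    apply ih
    · exact hperm'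
    · rw [hlen']
      obtain ⟨m, hm⟩ : ∃ m, c.length = m + 1 := ⟨c.length - 1, by omega⟩
      have hsq : (m + 1) * (m + 1) = m * m + 2 * m + 1 := by ring
      rw [hm] at hfuel hr ⊢
      rw [hsq] at hfuel
      simp only [Nat.add_sub_cancel]
      omega

-- ===== VERDICT (by name: the statement is the Claim_ definition above) =====
theorem processes_spec : Claim_equal_processes := by
  intro c i _ hpre
  unfold Spec_processes processes processes_alt
  rw [PySem.List.slice_to_natCast]
  have hsplit : i = i.take c.length ++ i.drop c.length := (List.take_append_drop ..).symm
  have hfuel : c.length * c.length + c.length ≤ (c.length + 1) * (c.length + 1) := by nlinarith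
  calc processesLoopA ((c.length + 1) * (c.length + 1)) c i 0
      = processesLoopA ((c.length + 1) * (c.length + 1)) c
          (i.take c.length ++ i.drop c.length) 0 := by rw [← hsplit]
    _ = processesLoopB (i.take c.length) c 0 := loopA_eq_loopB _ _ _ _ _ hpre hfuel
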